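-- pv_equiv track=rewrite | github.com/necst/trilli | common/generator/generator.py | generate_patterns_and_offsets
-- ===== SOURCE A (Python) =====
-- import math
--
-- def coord_idx_generator(i, id, chunks, pe):
--   return math.floor((pe*i + id) / chunks)
--
-- def generate_pattern(NUM_INT_PE, aie_idx):
--   all_loops = []
--   for j in range (1, NUM_INT_PE+1):
--     loops = [0 for i in range(0, NUM_INT_PE)]
--     for i in range(0, NUM_INT_PE):
--       q = coord_idx_generator(i, aie_idx, j, NUM_INT_PE)
--       if q < NUM_INT_PE:
--         loops[q] = 1
--     all_loops.append(loops)
--   return all_loops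
--
-- def find_shift(sequence1, sequence2):
--   # Ensure sequences have the same length
--   assert len(sequence1) == len(sequence2), "Sequences must have the same length"
--
--   sequence1 = sequence1 * 3
--
--   for shift in range (0, len(sequence2)):
--     shifted = sequence1[shift:len(sequence2)+shift]
--     if shifted == sequence2:
--       return shift
--   return None
--
-- def convert_to_MSWLSW(bitarray):
--     LSW = 0
--     MSW = 0
--
--     r = 128 - len(bitarray)
--     assert r >= 0, "too many bits"
--
--     bitarray = bitarray + [0] * r
--
--     for i, b in enumerate(bitarray):
--         if i < 64:
--             LSW += 2**i if b else 0
--         else: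
--             MSW += 2**(i-64) if b else 0
--
--     return f"{{{LSW}ULL, {MSW}ULL}}"
--
-- def generate_patterns_and_offsets(NUM_INT_PE):
--     all_patterns = [generate_pattern(NUM_INT_PE, i) for i in range(0, NUM_INT_PE)] # [AIE][N_class][seq]
--     offsets = []
--
--     if NUM_INT_PE == 1:
--         return '[[1UL, 0UL]]', [[0, 1]], all_patterns[0]
--
--     for N_class in range(0, NUM_INT_PE):
--         base_shift = 0
--         shift = 0
--         equal_count = 1
--         for aie_idx in range(1, NUM_INT_PE):
--             shift = find_shift(all_patterns[0][N_class], all_patterns[aie_idx][N_class])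
--             if shift == base_shift:
--                 equal_count += 1
--             else:
--                 break
--         offsets.append([shift, equal_count])
--
--     converted_patterns = '[' + ', '.join([convert_to_MSWLSW(p) for p in all_patterns[0]]) + ']'
--
--     return converted_patterns, offsets, all_patterns[0]
-- ===== SOURCE B (Python) =====
-- def _rot_shift(seq1, seq2):
--     # first shift such that rotating seq1 left by it gives seq2, else None
--     for sh in range(len(seq2)):
--         if seq1[sh:] + seq1[:sh] == seq2:
--             return sh
--     return None
--
-- def _row(n, aie, j):
--     # position q is 1 iff some i in [0,n) has floor((n*i+aie)/j) == q,
--     # decided in O(1) via the smallest such i (ceiling division)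
--     out = []
--     for q in range(n):
--         i1 = -((aie - j * q) // n)  # ceil((j*q - aie)/n)
--         if i1 < 0:
--             i1 = 0
--         out.append(1 if i1 < n and n * i1 + aie < j * (q + 1) else 0)
--     return out
--
-- def _pattern(n, aie):
--     return [_row(n, aie, j) for j in range(1, n + 1)]
--
-- def _words(bits):
--     # {LSW, MSW} via Horner evaluation of each 64-bit half
--     bs = bits + [0] * (128 - len(bits))
--     lo = 0
--     for b in reversed(bs[:64]):
--         lo = 2 * lo + (1 if b else 0)
--     hi = 0
--     for b in reversed(bs[64:]):
--         hi = 2 * hi + (1 if b else 0)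
--     return f"{{{lo}ULL, {hi}ULL}}"
--
-- def generate_patterns_and_offsets(NUM_INT_PE):
--     n = NUM_INT_PE
--     p0 = _pattern(n, 0)
--     if n == 1:
--         return '[[1UL, 0UL]]', [[0, 1]], p0
--     pats = [p0] + [_pattern(n, a) for a in range(1, n)]
--     offsets = []
--     for c in range(n):
--         k = n
--         for a in range(1, n):
--             if pats[a][c] != p0[c]:
--                 k = a
--                 break
--         if k == n:
--             offsets.append([0, n])
--         else:
--             offsets.append([_rot_shift(p0[c], pats[k][c]), k])
--     converted = '[' + ', '.join(_words(p) for p in p0) + ']'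
--     return converted, offsets, p0
-- ===== Notes on version B (the rewrite author's own statement) =====
-- stated objective: alternative
-- what changed: B builds each pattern row by a constant-time ceiling-division membership test per position instead of A's scatter loop, replaces A's per-aie quadratic find_shift calls by a plain first-mismatch equality scan followed by a single rotation search (rotation built as two slices instead of A's tripled-list slicing), and converts rows to the LSW/MSW word pair by Horner evaluation instead of a power sum.
import Mathlib
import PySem

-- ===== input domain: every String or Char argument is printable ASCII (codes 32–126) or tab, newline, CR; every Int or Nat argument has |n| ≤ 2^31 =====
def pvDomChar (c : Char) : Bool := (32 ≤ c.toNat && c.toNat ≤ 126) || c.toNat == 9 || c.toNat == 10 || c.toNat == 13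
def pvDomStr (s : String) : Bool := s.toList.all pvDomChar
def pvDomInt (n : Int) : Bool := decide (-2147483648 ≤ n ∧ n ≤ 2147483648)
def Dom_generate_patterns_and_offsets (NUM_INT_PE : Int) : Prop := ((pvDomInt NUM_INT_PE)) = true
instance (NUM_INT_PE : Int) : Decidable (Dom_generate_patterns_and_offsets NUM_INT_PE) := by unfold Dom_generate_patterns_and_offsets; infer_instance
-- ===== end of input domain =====

-- B replaces A's scatter-loop pattern rows by a per-position arithmetic test, A's repeated
-- O(n^2) find_shift calls by a first-mismatch scan plus a single rotation search on the
-- doubled list, and the power-sum word conversion by Horner evaluation (objective: alternative).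

-- ===== PORT A =====
-- math.floor((pe*i + id)/chunks): exact as floor division here (all arguments are small ints, chunks > 0 at every call)
def pvCoordIdx (i id chunks pe : Int) : Int :=
  PySem.Int.floordiv (pe * i + id) chunks

def pvGenPattern (NUM_INT_PE aie_idx : Int) : List (List Int) :=
  (PySem.List.pyRange 1 (NUM_INT_PE + 1) 1).foldl (fun all_loops j =>
    let loops : List Int := (PySem.List.pyRange 0 NUM_INT_PE 1).map (fun _ => (0 : Int))
    let loops := (PySem.List.pyRange 0 NUM_INT_PE 1).foldl (fun loops i =>
      let q := pvCoordIdx i aie_idx j NUM_INT_PE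
      if q < NUM_INT_PE then PySem.List.pySetD loops q 1 else loops) loops
    all_loops ++ [loops]) []

-- Python's `assert len == len` raises where lengths differ; ported as the `none` branch (unreachable at every call site under Pre_)
def pvFindShift (sequence1 sequence2 : List Int) : Option Int :=
  if sequence1.length ≠ sequence2.length then none
  else
    let s1 := PySem.List.pyRepeat sequence1 3
    (PySem.List.pyRange 0 (sequence2.length : Int) 1).foldl (fun acc shift =>
      match acc with
      | some r => some r
      | none =>
        if PySem.List.slice s1 (some shift) (some ((sequence2.length : Int) + shift)) = sequence2
        then some shift else none) none

-- `assert r >= 0` raises for len > 128 (excluded by Pre_); the port's Nat subtraction clamps there instead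
def pvConvert (bitarray : List Int) : String :=
  let bs := bitarray ++ List.replicate (128 - bitarray.length) (0 : Int)
  let p := (PySem.List.enumerate bs 0).foldl (fun (lm : Int × Int) ib =>
    if ib.1 < 64 then (lm.1 + (if ib.2 ≠ 0 then 2 ^ ib.1.toNat else 0), lm.2)
    else (lm.1, lm.2 + (if ib.2 ≠ 0 then 2 ^ (ib.1 - 64).toNat else 0))) ((0 : Int), (0 : Int))
  "{" ++ PySem.Int.toStr p.1 ++ "ULL, " ++ PySem.Int.toStr p.2 ++ "ULL}"

-- the `for aie_idx in range(1, n)` loop with its break; state = (shift, equal_count)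
def pvOffLoopA (pats : List (List (List Int))) (c : Int) :
    List Int → Option Int × Int → Option Int × Int
  | [], st => st
  | aie :: rest, st =>
    let shift := pvFindShift (PySem.List.pyGetD (PySem.List.pyGetD pats 0 []) c [])
                             (PySem.List.pyGetD (PySem.List.pyGetD pats aie []) c [])
    if shift = some 0 then pvOffLoopA pats c rest (shift, st.2 + 1)
    else (shift, st.2)

def generate_patterns_and_offsets (NUM_INT_PE : Int) : String × List (List Int) × List (List Int) :=
  let all_patterns := (PySem.List.pyRange 0 NUM_INT_PE 1).map (fun i => pvGenPattern NUM_INT_PE i)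
  if NUM_INT_PE = 1 then
    ("[[1UL, 0UL]]", [[0, 1]], PySem.List.pyGetD all_patterns 0 [])
  else
    let offsets := (PySem.List.pyRange 0 NUM_INT_PE 1).foldl (fun offs N_class =>
      let r := pvOffLoopA all_patterns N_class (PySem.List.pyRange 1 NUM_INT_PE 1) (some 0, 1)
      -- Python appends the raw shift (None never occurs under Pre_); `.getD 0` only names the unreachable case
      offs ++ [[r.1.getD 0, r.2]]) []
    let converted := "[" ++ PySem.Str.join ", " ((PySem.List.pyGetD all_patterns 0 []).map pvConvert) ++ "]"
    (converted, offsets, PySem.List.pyGetD all_patterns 0 [])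

-- ===== PORT B =====
def pvRotShift (seq1 seq2 : List Int) : Option Int :=
  (PySem.List.pyRange 0 (seq2.length : Int) 1).foldl (fun acc sh =>
    match acc with
    | some r => some r
    | none =>
      if PySem.List.slice seq1 (some sh) none ++ PySem.List.slice seq1 none (some sh) = seq2
      then some sh else none) none

def pvRowB (n aie j : Int) : List Int :=
  (PySem.List.pyRange 0 n 1).foldl (fun out q =>
    let i1 := -(PySem.Int.floordiv (aie - j * q) n)
    let i1 := if i1 < 0 then 0 else i1
    out ++ [if i1 < n ∧ n * i1 + aie < j * (q + 1) then (1 : Int) else 0]) []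

def pvPatternB (n aie : Int) : List (List Int) :=
  (PySem.List.pyRange 1 (n + 1) 1).map (fun j => pvRowB n aie j)

def pvWordsB (bits : List Int) : String :=
  let bs := bits ++ List.replicate (128 - bits.length) (0 : Int)
  let lo := (PySem.List.slice bs none (some 64)).reverse.foldl
    (fun acc b => 2 * acc + (if b ≠ 0 then 1 else 0)) (0 : Int)
  let hi := (PySem.List.slice bs (some 64) none).reverse.foldl
    (fun acc b => 2 * acc + (if b ≠ 0 then 1 else 0)) (0 : Int)
  "{" ++ PySem.Int.toStr lo ++ "ULL, " ++ PySem.Int.toStr hi ++ "ULL}"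

-- first a in the list whose class-c row differs from p0's; dflt when none does
def pvFirstDiff (pats : List (List (List Int))) (p0 : List (List Int)) (c : Int) :
    List Int → Int → Int
  | [], dflt => dflt
  | a :: rest, dflt =>
    if PySem.List.pyGetD (PySem.List.pyGetD pats a []) c [] ≠ PySem.List.pyGetD p0 c [] then a
    else pvFirstDiff pats p0 c rest dflt

def generate_patterns_and_offsets_alt (NUM_INT_PE : Int) : String × List (List Int) × List (List Int) :=
  let n := NUM_INT_PE
  let p0 := pvPatternB n 0
  if n = 1 then ("[[1UL, 0UL]]", [[0, 1]], p0)
  else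
    let pats := [p0] ++ (PySem.List.pyRange 1 n 1).map (fun a => pvPatternB n a)
    let offsets := (PySem.List.pyRange 0 n 1).foldl (fun offs c =>
      let k := pvFirstDiff pats p0 c (PySem.List.pyRange 1 n 1) n
      if k = n then offs ++ [[0, n]]
      else offs ++ [[(pvRotShift (PySem.List.pyGetD p0 c [])
                        (PySem.List.pyGetD (PySem.List.pyGetD pats k []) c [])).getD 0, k]]) []
    let converted := "[" ++ PySem.Str.join ", " (p0.map pvWordsB) ++ "]"
    (converted, offsets, p0)

-- ===== PRECONDITION & SPEC =====
-- Pre_: exactly the inputs on which Python A returns (IndexError for n ≤ 0, AssertionError for n > 128)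
def Pre_generate_patterns_and_offsets (NUM_INT_PE : Int) : Prop :=
  1 ≤ NUM_INT_PE ∧ NUM_INT_PE ≤ 128
instance (NUM_INT_PE : Int) : Decidable (Pre_generate_patterns_and_offsets NUM_INT_PE) := by
  unfold Pre_generate_patterns_and_offsets; infer_instance

def pvWitness_generate_patterns_and_offsets : Int := 3

def Spec_generate_patterns_and_offsets (NUM_INT_PE : Int)
    (out : String × List (List Int) × List (List Int)) : Prop :=
  out = generate_patterns_and_offsets_alt NUM_INT_PE
instance (NUM_INT_PE : Int) (out : String × List (List Int) × List (List Int)) :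
    Decidable (Spec_generate_patterns_and_offsets NUM_INT_PE out) := by
  unfold Spec_generate_patterns_and_offsets; infer_instance

-- ===== CLAIM (what is proved, stated in full; the proofs are below) =====
def Claim_equal_generate_patterns_and_offsets : Prop :=
  ∀ (NUM_INT_PE : Int), Dom_generate_patterns_and_offsets NUM_INT_PE →
    Pre_generate_patterns_and_offsets NUM_INT_PE →
    Spec_generate_patterns_and_offsets NUM_INT_PE (generate_patterns_and_offsets NUM_INT_PE)

-- ===== LEMMAS AND PROOFS =====

def pvH (ys : List Int) : Int := ys.foldr (fun b acc => 2 * acc + (if b ≠ 0 then 1 else 0)) 0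

lemma pvEnumFold_hi (ys : List Int) : ∀ (i0 : Nat) (L M : Int), 64 ≤ i0 →
    (PySem.List.enumerate ys (i0 : Int)).foldl (fun (lm : Int × Int) ib =>
      if ib.1 < 64 then (lm.1 + (if ib.2 ≠ 0 then 2 ^ ib.1.toNat else 0), lm.2)
      else (lm.1, lm.2 + (if ib.2 ≠ 0 then 2 ^ (ib.1 - 64).toNat else 0))) (L, M)
    = (L, M + 2 ^ (i0 - 64) * pvH ys) := by
  induction ys with
  | nil => intro i0 L M h; simp [PySem.List.enumerate_nil, pvH]
  | cons y t ih =>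
    intro i0 L M h
    rw [PySem.List.enumerate_cons]
    have h64 : ¬ ((i0 : Int) < 64) := by exact_mod_cast not_lt.mpr (by exact_mod_cast h)
    simp only [List.foldl_cons, h64, if_false]
    have : ((i0 : Int) + 1) = ((i0 + 1 : Nat) : Int) := by push_cast; ring
    rw [this, ih (i0 + 1) _ _ (by omega)]
    have ht : ((i0 : Int) - 64).toNat = i0 - 64 := by omega
    have hp : (2 : Int) ^ (i0 + 1 - 64) = 2 ^ (i0 - 64) * 2 := by
      rw [show i0 + 1 - 64 = (i0 - 64) + 1 by omega, pow_succ]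
    simp only [pvH, List.foldr_cons, ht, hp, Prod.mk.injEq]
    refine ⟨by trivial, ?_⟩
    split_ifs <;> ring

lemma pvEnumFold_lo (ys : List Int) : ∀ (i0 : Nat) (L M : Int), i0 ≤ 64 →
    (PySem.List.enumerate ys (i0 : Int)).foldl (fun (lm : Int × Int) ib =>
      if ib.1 < 64 then (lm.1 + (if ib.2 ≠ 0 then 2 ^ ib.1.toNat else 0), lm.2)
      else (lm.1, lm.2 + (if ib.2 ≠ 0 then 2 ^ (ib.1 - 64).toNat else 0))) (L, M)
    = (L + 2 ^ i0 * pvH (ys.take (64 - i0)), M + pvH (ys.drop (64 - i0))) := by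
  induction ys with
  | nil => intro i0 L M h; simp [PySem.List.enumerate_nil, pvH]
  | cons y t ih =>
    intro i0 L M h
    by_cases h64 : i0 = 64
    · subst h64
      rw [pvEnumFold_hi (y :: t) 64 L M le_rfl]
      simp [pvH]
    · have hlt : i0 < 64 := by omega
      rw [PySem.List.enumerate_cons]
      have h64' : ((i0 : Int) < 64) := by exact_mod_cast hlt
      simp only [List.foldl_cons, h64', if_true]
      have : ((i0 : Int) + 1) = ((i0 + 1 : Nat) : Int) := by push_cast; ring
      rw [this, ih (i0 + 1) _ _ (by omega)]
      have ht1 : 64 - i0 = (64 - (i0 + 1)) + 1 := by omega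
      have hp : (2 : Int) ^ (i0 + 1) = 2 ^ i0 * 2 := pow_succ 2 i0
      have htn : (i0 : Int).toNat = i0 := by omega
      simp only [ht1, List.take_succ_cons, List.drop_succ_cons, pvH, List.foldr_cons, hp, htn,
        Prod.mk.injEq]
      refine ⟨?_, by trivial⟩
      split_ifs <;> ring

lemma pvConvert_eq_pvWordsB (bits : List Int) : pvConvert bits = pvWordsB bits := by
  simp only [pvConvert, pvWordsB]
  have hlo := pvEnumFold_lo (bits ++ List.replicate (128 - bits.length) (0 : Int)) 0 0 0 (by omega)
  simp only [Nat.cast_zero, pow_zero, Nat.sub_zero, one_mul, zero_add] at hlo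
  rw [hlo]
  simp [pysem, pvH, List.foldl_reverse]

lemma pvFoldHit_some (p : Int → Prop) [DecidablePred p] (l : List Int) (r : Int) :
    l.foldl (fun acc x => match acc with
      | some r' => some r'
      | none => if p x then some x else none) (some r) = some r := by
  induction l with
  | nil => rfl
  | cons y t ih => simpa using ih

lemma pvFoldHit_none (p : Int → Prop) [DecidablePred p] (l : List Int) :
    l.foldl (fun acc x => match acc with
      | some r' => some r'
      | none => if p x then some x else none) none = l.find? (fun x => decide (p x)) := by
  induction l with
  | nil => rfl
  | cons y t ih =>
    simp only [List.foldl_cons, List.find?_cons]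
    by_cases hy : p y
    · simp [hy, pvFoldHit_some]
    · simp [hy, ih]

lemma pvFind?_congr {p q : Int → Bool} : ∀ (l : List Int), (∀ x ∈ l, p x = q x) → l.find? p = l.find? q := by
  intro l
  induction l with
  | nil => intro _; rfl
  | cons y t ih =>
    intro h
    simp only [List.find?_cons, h y (by simp)]
    cases q y with
    | true => rfl
    | false => exact ih (fun x hx => h x (by simp [hx]))

lemma pvSliceRot (s1 : List Int) (sh : Int) (h0 : 0 ≤ sh) (hsh : sh < (s1.length : Int)) :
    PySem.List.slice (PySem.List.pyRepeat s1 3) (some sh) (some ((s1.length : Int) + sh))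
      = PySem.List.slice s1 (some sh) none ++ PySem.List.slice s1 none (some sh) := by
  rw [PySem.List.slice_from _ h0, PySem.List.slice_to _ h0]
  have hrep : PySem.List.pyRepeat s1 3 = s1 ++ s1 ++ s1 := by simp [PySem.List.pyRepeat]
  rw [hrep, PySem.List.slice_toNat _ h0 (by omega)]
  have hk : sh.toNat ≤ s1.length := by omega
  have hm : ((s1.length : Int) + sh).toNat - sh.toNat = s1.length := by omega
  rw [hm, List.drop_append_of_le_length (by simp; omega), List.drop_append_of_le_length hk,
      List.append_assoc, List.take_append, List.take_append]
  rw [List.take_of_length_le (by simp),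
      show s1.length - (s1.drop sh.toNat).length = sh.toNat by simp; omega,
      show sh.toNat - s1.length = 0 by omega, List.take_zero, List.append_nil]

lemma pvFindShift_eq_rotShift (s1 s2 : List Int) (h : s1.length = s2.length) :
    pvFindShift s1 s2 = pvRotShift s1 s2 := by
  simp only [pvFindShift, pvRotShift]
  rw [if_neg (by simp [h])]
  rw [pvFoldHit_none (p := fun shift => PySem.List.slice (PySem.List.pyRepeat s1 3) (some shift)
        (some ((s2.length : Int) + shift)) = s2),
      pvFoldHit_none (p := fun sh => PySem.List.slice s1 (some sh) none
        ++ PySem.List.slice s1 none (some sh) = s2)]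
  apply pvFind?_congr
  intro x hx
  have hx' := (PySem.List.mem_pyRange_one).mp hx
  have hrot := pvSliceRot s1 x hx'.1 (by rw [h]; exact hx'.2)
  rw [h] at hrot
  simp [hrot]

lemma pvSlice0 (s1 : List Int) (L : Int) (hL : s1.length = L.toNat) (hpos : 0 < L) :
    PySem.List.slice (PySem.List.pyRepeat s1 3) (some 0) (some (L + 0)) = s1 := by
  have : L = (s1.length : Int) := by omega
  subst this
  rw [pvSliceRot s1 0 le_rfl (by omega)]
  rw [PySem.List.slice_from _ le_rfl, PySem.List.slice_to _ le_rfl]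
  simp

lemma pvFindShift_self_iff (s1 s2 : List Int) (h : s1.length = s2.length)
    (hpos : 0 < s2.length) : (pvFindShift s1 s2 = some 0) ↔ s1 = s2 := by
  simp only [pvFindShift]
  rw [if_neg (by simp [h])]
  rw [pvFoldHit_none (p := fun shift => PySem.List.slice (PySem.List.pyRepeat s1 3) (some shift)
        (some ((s2.length : Int) + shift)) = s2)]
  rw [PySem.List.pyRange_one_cons (by exact_mod_cast hpos)]
  rw [List.find?_cons]
  have h0 : PySem.List.slice (PySem.List.pyRepeat s1 3) (some 0) (some ((s2.length : Int) + 0)) = s1 :=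
    pvSlice0 s1 _ (by omega) (by exact_mod_cast hpos)
  by_cases he : s1 = s2
  · subst he
    have hrep : PySem.List.pyRepeat s1 3 = s1 ++ s1 ++ s1 := by simp [PySem.List.pyRepeat]
    have ht : List.take s1.length (PySem.List.pyRepeat s1 3) = s1 := by
      rw [hrep, List.take_append, List.take_append]
      simp
    simp [ht]
  · have hcond : (PySem.List.slice (PySem.List.pyRepeat s1 3) (some 0)
        (some ((s2.length : Int) + 0)) = s2) = False := by
      rw [h0]; simp [he]
    simp only [hcond, decide_false]
    constructor
    · intro hf
      exfalso
      have hmem := List.mem_of_find?_eq_some hf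
      have := (PySem.List.mem_pyRange_one).mp hmem
      omega
    · intro he'; exact absurd he' he

lemma pvHit_iff (n aie j q : Int) (hn : 0 < n) (_ha : 0 ≤ aie) (hj : 0 < j)
    (_hq0 : 0 ≤ q) (_hqn : q < n) :
    (∃ i ∈ PySem.List.pyRange 0 n 1, pvCoordIdx i aie j n = q) ↔
    ((if -(PySem.Int.floordiv (aie - j * q) n) < 0 then 0
        else -(PySem.Int.floordiv (aie - j * q) n)) < n ∧
      n * (if -(PySem.Int.floordiv (aie - j * q) n) < 0 then 0
        else -(PySem.Int.floordiv (aie - j * q) n)) + aie < j * (q + 1)) := by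
  have hneg : aie - j * q = -(j * q - aie) := by ring
  have hchar : (-PySem.Int.floordiv (aie - j * q) n - 1) * n < j * q - aie ∧
      j * q - aie ≤ (-PySem.Int.floordiv (aie - j * q) n) * n := by
    rw [hneg]
    exact (PySem.Int.neg_floordiv_neg_eq_iff_of_pos hn).mp rfl
  set i0 : Int := -(PySem.Int.floordiv (aie - j * q) n) with hi0
  set i1 : Int := if i0 < 0 then 0 else i0 with hi1
  have hi1nn : 0 ≤ i1 := by rw [hi1]; split_ifs <;> omega
  have hi1lb : j * q - aie ≤ i1 * n := by
    rw [hi1]; split_ifs with hc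
    · nlinarith [hchar.2]
    · exact hchar.2
  constructor
  · rintro ⟨i, hi, hfi⟩
    have hi' := (PySem.List.mem_pyRange_one).mp hi
    simp only [pvCoordIdx] at hfi
    have hb := (PySem.Int.floordiv_eq_iff_of_pos hj).mp hfi
    -- i1 ≤ i
    have hile : i1 ≤ i := by
      rw [hi1]; split_ifs with hc
      · omega
      · have h1 : (i0 - 1) * n < i * n := by nlinarith [hchar.1, hb.1]
        nlinarith [h1]
    refine ⟨by omega, ?_⟩
    have : n * i1 ≤ n * i := by nlinarith
    nlinarith [hb.2]
  · rintro ⟨h1, h2⟩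
    refine ⟨i1, (PySem.List.mem_pyRange_one).mpr ⟨hi1nn, h1⟩, ?_⟩
    simp only [pvCoordIdx]
    rw [PySem.Int.floordiv_eq_iff_of_pos hj]
    constructor
    · nlinarith [hi1lb]
    · nlinarith [h2]

lemma pvSetFold_length (n aie j : Int) : ∀ (I : List Int) (loops : List Int),
    (I.foldl (fun loops i =>
      let q := pvCoordIdx i aie j n
      if q < n then PySem.List.pySetD loops q 1 else loops) loops).length = loops.length := by
  intro I
  induction I with
  | nil => intro loops; rfl
  | cons i rest ih =>
    intro loops
    simp only [List.foldl_cons]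
    split_ifs
    · rw [ih]; simp [PySem.List.length_pySetD]
    · rw [ih]

lemma pvSetFold_getD (n aie j : Int) (hn : 0 < n) (ha : 0 ≤ aie) (hj : 0 < j) :
    ∀ (I : List Int) (loops : List Int) (k : Nat), (∀ i ∈ I, 0 ≤ i) → ((k : Int) < n) →
    k < loops.length →
    (I.foldl (fun loops i =>
      let q := pvCoordIdx i aie j n
      if q < n then PySem.List.pySetD loops q 1 else loops) loops).getD k 0
    = if ∃ i ∈ I, pvCoordIdx i aie j n = (k : Int) then 1 else loops.getD k 0 := by
  intro I
  induction I with
  | nil => intro loops k _ _ _; simp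
  | cons i rest ih =>
    intro loops k hI hk hklen
    have hq0 : 0 ≤ pvCoordIdx i aie j n := by
      simp only [pvCoordIdx]
      rw [PySem.Int.floordiv_eq_ediv_of_pos hj]
      exact Int.ediv_nonneg (by nlinarith [hI i (by simp)]) (le_of_lt hj)
    simp only [List.foldl_cons]
    by_cases hq : pvCoordIdx i aie j n < n
    · rw [if_pos hq, PySem.List.pySetD_of_nonneg _ _ hq0]
      rw [ih _ k (fun x hx => hI x (by simp [hx])) hk (by simpa using hklen)]
      have hset : (loops.set (pvCoordIdx i aie j n).toNat 1).getD k 0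
          = if pvCoordIdx i aie j n = (k : Int) then 1 else loops.getD k 0 := by
        rw [List.getD_eq_getElem _ _ (by simpa using hklen), List.getElem_set,
            List.getD_eq_getElem _ _ hklen]
        have : ((pvCoordIdx i aie j n).toNat = k) ↔ (pvCoordIdx i aie j n = (k : Int)) := by omega
        split_ifs with h1 h2 h2 <;> first | rfl | (exfalso; omega)
      rw [hset]
      by_cases hex : ∃ x ∈ rest, pvCoordIdx x aie j n = (k : Int)
      · simp [hex]
      · by_cases hfi : pvCoordIdx i aie j n = (k : Int) <;> simp [hex, hfi]
    · rw [if_neg hq]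
      rw [ih _ k (fun x hx => hI x (by simp [hx])) hk hklen]
      have hfi : ¬ (pvCoordIdx i aie j n = (k : Int)) := by intro h; rw [h] at hq; omega
      by_cases hex : ∃ x ∈ rest, pvCoordIdx x aie j n = (k : Int) <;> simp [hex, hfi]

lemma pvRow_eq (n aie j : Int) (hn : 0 < n) (ha : 0 ≤ aie) (hj : 0 < j) :
    ((PySem.List.pyRange 0 n 1).foldl (fun loops i =>
      let q := pvCoordIdx i aie j n
      if q < n then PySem.List.pySetD loops q 1 else loops)
      ((PySem.List.pyRange 0 n 1).map (fun _ => (0 : Int)))) = pvRowB n aie j := by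
  have hrowB : pvRowB n aie j = (PySem.List.pyRange 0 n 1).map (fun q =>
      if (if -(PySem.Int.floordiv (aie - j * q) n) < 0 then 0
            else -(PySem.Int.floordiv (aie - j * q) n)) < n ∧
          n * (if -(PySem.Int.floordiv (aie - j * q) n) < 0 then 0
            else -(PySem.Int.floordiv (aie - j * q) n)) + aie < j * (q + 1)
      then (1 : Int) else 0) := by
    simp only [pvRowB]
    rw [PySem.List.foldl_append_singleton_eq_map]
    simp
  have hlen0 : ((PySem.List.pyRange 0 n 1).map (fun _ => (0 : Int))).length = n.toNat := by
    simp [PySem.List.length_pyRange_one]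
  apply List.ext_getElem
  · rw [pvSetFold_length, hrowB]
    simp [PySem.List.length_pyRange_one]
  · intro k hk1 hk2
    have hkn : (k : Int) < n := by
      rw [pvSetFold_length, hlen0] at hk1; omega
    rw [← List.getD_eq_getElem _ 0 hk1]
    rw [pvSetFold_getD n aie j hn ha hj _ _ k
        (fun x hx => ((PySem.List.mem_pyRange_one).mp hx).1) hkn (by omega)]
    simp only [hrowB, List.getElem_map, PySem.List.getElem_pyRange_one, zero_add]
    have hbase : ((PySem.List.pyRange 0 n 1).map (fun _ => (0 : Int))).getD k 0 = 0 := by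
      rw [List.getD_eq_getElem _ _ (by omega), List.getElem_map]
    rw [hbase]
    have hiff := pvHit_iff n aie j (k : Int) hn ha hj (by omega) hkn
    by_cases hex : ∃ i ∈ PySem.List.pyRange 0 n 1, pvCoordIdx i aie j n = (k : Int)
    · rw [if_pos hex, if_pos (hiff.mp hex)]
    · rw [if_neg hex, if_neg (fun h => hex (hiff.mpr h))]

lemma pvPattern_eq (n aie : Int) (hn : 0 < n) (ha : 0 ≤ aie) :
    pvGenPattern n aie = pvPatternB n aie := by
  simp only [pvGenPattern, pvPatternB]
  rw [PySem.List.foldl_append_singleton_eq_map]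
  rw [List.nil_append]
  apply List.map_congr_left
  intro j hj
  exact pvRow_eq n aie j hn ha ((PySem.List.mem_pyRange_one).mp hj).1

lemma pvRowB_length (n aie j : Int) : (pvRowB n aie j).length = n.toNat := by
  simp only [pvRowB]
  rw [PySem.List.foldl_append_singleton_eq_map]
  simp [PySem.List.length_pyRange_one]

lemma pvPatternB_row (n a c : Int) (h0 : 0 ≤ c) (hc : c < n) :
    PySem.List.pyGetD (pvPatternB n a) c [] = pvRowB n a (1 + c) := by
  simp only [pvPatternB]
  rw [show c = ((c.toNat : Nat) : Int) by omega]
  rw [PySem.List.pyGetD_map_pyRange_one _ _ _ _ _ (by omega)]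

lemma pvOffLoop_eq (pats : List (List (List Int))) (p0 : List (List Int)) (c : Int)
    (h0 : PySem.List.pyGetD pats 0 [] = p0) :
    ∀ (m : Nat) (a : Int),
      (∀ x ∈ PySem.List.pyRange a (a + (m : Int)) 1,
        (PySem.List.pyGetD (PySem.List.pyGetD pats x []) c []).length
          = (PySem.List.pyGetD p0 c []).length) →
      0 < (PySem.List.pyGetD p0 c []).length →
      pvOffLoopA pats c (PySem.List.pyRange a (a + (m : Int)) 1) (some 0, a)
      = (if pvFirstDiff pats p0 c (PySem.List.pyRange a (a + (m : Int)) 1) (a + (m : Int))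
            = a + (m : Int)
         then (some 0, a + (m : Int))
         else (pvRotShift (PySem.List.pyGetD p0 c [])
                (PySem.List.pyGetD (PySem.List.pyGetD pats
                  (pvFirstDiff pats p0 c (PySem.List.pyRange a (a + (m : Int)) 1)
                    (a + (m : Int))) []) c []),
               pvFirstDiff pats p0 c (PySem.List.pyRange a (a + (m : Int)) 1)
                 (a + (m : Int)))) := by
  intro m
  induction m with
  | zero =>
    intro a _ _
    have hnil : PySem.List.pyRange a (a + ((0 : Nat) : Int)) 1 = [] := by
      rw [PySem.List.pyRange_one]
      norm_num
    simp [pvOffLoopA, pvFirstDiff]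
  | succ m ih =>
    intro a hlen hpos
    have hcast : a + ((m + 1 : Nat) : Int) = (a + 1) + (m : Int) := by push_cast; ring
    rw [hcast] at hlen ⊢
    have hcons : PySem.List.pyRange a ((a + 1) + (m : Int)) 1
        = a :: PySem.List.pyRange (a + 1) ((a + 1) + (m : Int)) 1 := by
      rw [PySem.List.pyRange_one_cons (by omega)]
    rw [hcons]
    have hmema : a ∈ PySem.List.pyRange a ((a + 1) + (m : Int)) 1 := by
      rw [hcons]; simp
    have hlena := hlen a hmema
    simp only [pvOffLoopA, h0]
    by_cases heq : PySem.List.pyGetD (PySem.List.pyGetD pats a []) c []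
        = PySem.List.pyGetD p0 c [] 
    · have hsome : pvFindShift (PySem.List.pyGetD p0 c [])
          (PySem.List.pyGetD (PySem.List.pyGetD pats a []) c []) = some 0 :=
        (pvFindShift_self_iff _ _ (by omega) (by omega)).mpr heq.symm
      rw [hsome, if_pos rfl]
      have hrec := ih (a + 1) (fun x hx => hlen x (by rw [hcons]; exact List.mem_cons_of_mem _ hx)) hpos
      rw [hrec]
      simp only [pvFirstDiff, if_neg (not_ne_iff.mpr heq)]
    · have hne : pvFindShift (PySem.List.pyGetD p0 c [])
          (PySem.List.pyGetD (PySem.List.pyGetD pats a []) c []) ≠ some 0 := by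
        intro h
        exact heq ((pvFindShift_self_iff _ _ (by omega) (by omega)).mp h).symm
      rw [if_neg hne]
      simp only [pvFirstDiff, if_pos (by simpa using heq)]
      rw [if_neg (by omega)]
      rw [pvFindShift_eq_rotShift _ _ (by omega)]

lemma pvFoldIteAppend {β : Type} (P : Int → Prop) [DecidablePred P] (u v : Int → β) :
    ∀ (l : List Int) (acc : List β),
      l.foldl (fun offs c => if P c then offs ++ [u c] else offs ++ [v c]) acc
        = l.foldl (fun offs c => offs ++ [if P c then u c else v c]) acc := by
  intro l
  induction l with
  | nil => intro acc; rfl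
  | cons x t ih =>
    intro acc
    simp only [List.foldl_cons]
    by_cases hx : P x <;> simp only [hx, if_pos, ite_false] <;> exact ih _

theorem pvMain (n : Int) (h1 : 1 ≤ n) :
    generate_patterns_and_offsets n = generate_patterns_and_offsets_alt n := by
  by_cases hn1 : n = 1
  · subst hn1; decide
  · have hn0 : (0 : Int) < n := by omega
    simp only [generate_patterns_and_offsets, generate_patterns_and_offsets_alt]
    rw [if_neg hn1, if_neg hn1]
    have hpats : (PySem.List.pyRange 0 n 1).map (fun i => pvGenPattern n i)
        = pvPatternB n 0 :: (PySem.List.pyRange 1 n 1).map (fun a => pvPatternB n a) := by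
      rw [PySem.List.pyRange_one_cons hn0, List.map_cons, show (0 : Int) + 1 = 1 by ring,
          pvPattern_eq n 0 hn0 le_rfl]
      congr 1
      apply List.map_congr_left
      intro a hax
      exact pvPattern_eq n a hn0 (by have := (PySem.List.mem_pyRange_one).mp hax; omega)
    rw [hpats, List.singleton_append]
    have hA0 : PySem.List.pyGetD
        (pvPatternB n 0 :: (PySem.List.pyRange 1 n 1).map (fun a => pvPatternB n a)) 0 []
        = pvPatternB n 0 := PySem.List.pyGetD_zero_cons _ _ _
    rw [hA0]
    refine congrArg₂ _ ?_ (congrArg₂ _ ?_ rfl)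
    · -- converted strings
      rw [show pvConvert = pvWordsB from funext pvConvert_eq_pvWordsB]
    · -- offsets
      rw [pvFoldIteAppend]
      rw [PySem.List.foldl_append_singleton_eq_map, PySem.List.foldl_append_singleton_eq_map,
          List.nil_append, List.nil_append]
      apply List.map_congr_left
      intro c hc
      have hcb := (PySem.List.mem_pyRange_one).mp hc
      have hgetpat : ∀ x : Int, 0 ≤ x → x < n →
          PySem.List.pyGetD
            (pvPatternB n 0 :: (PySem.List.pyRange 1 n 1).map (fun a => pvPatternB n a)) x []
          = pvPatternB n x := by
        intro x hx0 hxn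
        rw [← hpats, PySem.List.pyGetD_map_pyRange_of_nonneg _ _ _ _ hx0 hxn]
        exact pvPattern_eq n x hn0 hx0
      have hrow0 : PySem.List.pyGetD (pvPatternB n 0) c [] = pvRowB n 0 (1 + c) :=
        pvPatternB_row n 0 c hcb.1 hcb.2
      have hlenrow : ∀ x ∈ PySem.List.pyRange 1 (1 + (((n - 1).toNat : Nat) : Int)) 1,
          (PySem.List.pyGetD (PySem.List.pyGetD
            (pvPatternB n 0 :: (PySem.List.pyRange 1 n 1).map (fun a => pvPatternB n a)) x []) c []).length
          = (PySem.List.pyGetD (pvPatternB n 0) c []).length := by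
        intro x hx
        have hxb := (PySem.List.mem_pyRange_one).mp hx
        rw [hgetpat x (by omega) (by omega), pvPatternB_row n x c hcb.1 hcb.2, hrow0,
            pvRowB_length, pvRowB_length]
      have hpos : 0 < (PySem.List.pyGetD (pvPatternB n 0) c []).length := by
        rw [hrow0, pvRowB_length]; omega
      have hloop := pvOffLoop_eq
        (pvPatternB n 0 :: (PySem.List.pyRange 1 n 1).map (fun a => pvPatternB n a))
        (pvPatternB n 0) c hA0 (n - 1).toNat 1 hlenrow hpos
      rw [show (1 : Int) + (((n - 1).toNat : Nat) : Int) = n from by omega] at hloop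
      rw [hloop]
      split_ifs with hk
      · rfl
      · rfl

-- ===== VERDICT (by name: the statement is the Claim_ definition above) =====
theorem generate_patterns_and_offsets_spec : Claim_equal_generate_patterns_and_offsets := by
  intro NUM_INT_PE _ hpre
  unfold Spec_generate_patterns_and_offsets
  exact pvMain NUM_INT_PE hpre.1
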